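-- pv_equiv track=rewrite | github.com/Peneyra/Gif_Builder | Weather GIF.py | coeff_round
-- ===== SOURCE A (Python) =====
-- def coeff_round(x):
--     k_cr = 54
--     n_cr = 3
--     for i in range(n_cr):
--         for j in range(9):
--             if x > (9.5-j) * (10 ** (2 - i)): return k_cr
--             k_cr -= 1
--             if x < (j-9.5) * (10 ** (2 - i)): return k_cr
--             k_cr -= 1
--     return 0
-- ===== SOURCE B (Python) =====
-- _THRESH2 = [(19 - 2*j) * 10**i for i in range(3) for j in range(8, -1, -1)]
-- # ascending doubled thresholds: [3,5,...,19, 30,...,190, 300,...,1900]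
--
-- def coeff_round(x):
--     t = 2*x if x > 0 else -2*x
--     lo, hi = 0, 27
--     while lo < hi:
--         mid = (lo + hi) // 2
--         if _THRESH2[mid] < t:
--             lo = mid + 1
--         else:
--             hi = mid
--     if lo == 0:
--         return 0
--     return 2*lo if x > 0 else 2*lo - 1
-- ===== Notes on version B (the rewrite author's own statement) =====
-- stated objective: alternative
-- what changed: Replaces A's linear scan of the interleaved positive/negative threshold tests by a binary search over a precomputed ascending threshold table, with the coefficient recovered arithmetically from the insertion point and the sign of x.
import Mathlib
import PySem

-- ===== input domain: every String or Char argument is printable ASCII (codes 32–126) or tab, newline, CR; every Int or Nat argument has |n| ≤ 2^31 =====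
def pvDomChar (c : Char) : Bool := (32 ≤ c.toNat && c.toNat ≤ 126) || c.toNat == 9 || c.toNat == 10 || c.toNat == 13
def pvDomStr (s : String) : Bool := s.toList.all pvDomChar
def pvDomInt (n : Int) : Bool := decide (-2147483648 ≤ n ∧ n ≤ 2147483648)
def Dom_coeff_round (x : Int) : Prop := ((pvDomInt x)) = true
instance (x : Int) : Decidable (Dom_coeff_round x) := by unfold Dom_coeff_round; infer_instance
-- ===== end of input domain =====

-- B replaces A's linear scan of interleaved threshold tests by one binary search
-- over a precomputed ascending threshold table (objective: alternative/faster scan).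

-- ===== PORT A =====
-- A compares the Int x with float thresholds (9.5-j)*10^(2-i); all these floats are exact
-- half-integers, so 'x > (9.5-j)*10^(2-i)' is ported exactly as '2*x > (19-2*j)*10^(2-i)'.
-- inner 'for j in range(9)' loop; returns some r on an early return, none to continue
def coeffA_j (x : Int) (i : Int) : List Int → Int → Option Int
  | [], _ => none
  | j :: js, k =>
    if 2 * x > (19 - 2 * j) * 10 ^ (2 - i).toNat then some k
    else if 2 * x < (2 * j - 19) * 10 ^ (2 - i).toNat then some (k - 1)
    else coeffA_j x i js (k - 2)

-- outer 'for i in range(n_cr)' loop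
def coeffA_i (x : Int) : List Int → Int → Int
  | [], _ => 0
  | i :: is, k =>
    match coeffA_j x i (PySem.List.pyRange 0 9 1) k with
    | some r => r
    | none => coeffA_i x is (k - 18)

def coeff_round (x : Int) : Int := coeffA_i x (PySem.List.pyRange 0 3 1) 54

-- ===== PORT B =====
-- ascending doubled thresholds, as built by Source B's comprehension
def coeffB_thresh2 : List Int :=
  (PySem.List.pyRange 0 3 1).flatMap (fun i =>
    (PySem.List.pyRange 8 (-1) (-1)).map (fun j => (19 - 2 * j) * 10 ^ i.toNat))

-- Source B's 'while lo < hi' binary-search loop; the first argument is structural fuel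
-- (hi - lo shrinks every iteration, so fuel 27 is never exhausted; the guard only makes it total)
-- list index is always in range there; getD is exact
def coeffB_bs (t : Int) : Nat → Nat → Nat → Nat
  | 0, lo, _ => lo
  | fuel + 1, lo, hi =>
    if lo < hi then
      let mid := (lo + hi) / 2
      if coeffB_thresh2.getD mid 0 < t then coeffB_bs t fuel (mid + 1) hi
      else coeffB_bs t fuel lo mid
    else lo

def coeff_round_alt (x : Int) : Int :=
  let t := if x > 0 then 2 * x else -(2 * x)
  let lo := coeffB_bs t 27 0 27
  if lo = 0 then 0
  else if x > 0 then 2 * (lo : Int) else 2 * (lo : Int) - 1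

-- ===== PRECONDITION & SPEC =====
def Spec_coeff_round (x : Int) (out : Int) : Prop := out = coeff_round_alt x
instance (x : Int) (out : Int) : Decidable (Spec_coeff_round x out) := by unfold Spec_coeff_round; infer_instance

-- ===== CLAIM (what is proved, stated in full; the proofs are below) =====
def Claim_equal_coeff_round : Prop := ∀ (x : Int), Dom_coeff_round x → Spec_coeff_round x (coeff_round x)

-- ===== LEMMAS AND PROOFS =====

lemma range3 : PySem.List.pyRange 0 3 1 = [0, 1, 2] := by decide
lemma range9 : PySem.List.pyRange 0 9 1 = [0, 1, 2, 3, 4, 5, 6, 7, 8] := by decide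

-- every threshold is ≤ 1900 (and getD out of range gives 0)
lemma thresh2_le (m : Nat) : coeffB_thresh2.getD m 0 ≤ 1900 := by
  have hall : ∀ a ∈ coeffB_thresh2, a ≤ 1900 := by decide
  by_cases h : m < coeffB_thresh2.length
  · rw [coeffB_thresh2.getD_eq_getElem 0 h]
    exact hall _ (List.getElem_mem h)
  · rw [List.getD_eq_default _ _ (by omega)]; norm_num

-- if every probed element is < t, binary search runs to the right end
lemma bs_all_lt (t : Int) (ht : ∀ m : Nat, coeffB_thresh2.getD m 0 < t) :
    ∀ fuel lo hi : Nat, hi - lo ≤ fuel → lo ≤ hi → coeffB_bs t fuel lo hi = hi := by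
  intro fuel
  induction fuel with
  | zero => intro lo hi h1 h2; rw [coeffB_bs]; omega
  | succ n ih =>
    intro lo hi h1 h2
    rw [coeffB_bs]
    by_cases h : lo < hi
    · rw [if_pos h]
      simp only []
      by_cases hm : coeffB_thresh2.getD ((lo + hi) / 2) 0 < t
      · rw [if_pos hm]; exact ih _ _ (by omega) (by omega)
      · exact absurd (ht _) hm
    · rw [if_neg h]; omega

lemma A_big_pos (x : Int) (h : 951 ≤ x) : coeff_round x = 54 := by
  unfold coeff_round
  rw [range3]
  unfold coeffA_i
  rw [range9]
  unfold coeffA_j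
  have h1 : 2 * x > (19 - 2 * (0 : Int)) * 10 ^ ((2 : Int) - 0).toNat := by
    show 2 * x > 1900; omega
  rw [if_pos h1]

lemma A_big_neg (x : Int) (h : x ≤ -951) : coeff_round x = 53 := by
  unfold coeff_round
  rw [range3]
  unfold coeffA_i
  rw [range9]
  unfold coeffA_j
  have h1 : ¬ 2 * x > (19 - 2 * (0 : Int)) * 10 ^ ((2 : Int) - 0).toNat := by
    show ¬ 2 * x > 1900; omega
  have h2 : 2 * x < (2 * (0 : Int) - 19) * 10 ^ ((2 : Int) - 0).toNat := by
    show 2 * x < -1900; omega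
  rw [if_neg h1, if_pos h2]
  norm_num

lemma B_big (x : Int) (h : 951 ≤ x ∨ x ≤ -951) : coeff_round_alt x = if 0 < x then 54 else 53 := by
  have ht : ∀ m : Nat, coeffB_thresh2.getD m 0 < (if x > 0 then 2 * x else -(2 * x)) := by
    intro m
    have := thresh2_le m
    split_ifs <;> omega
  simp only [coeff_round_alt]
  rw [bs_all_lt _ ht 27 0 27 (by omega) (by omega)]
  norm_num

set_option maxRecDepth 100000 in
lemma mid_all : ∀ n ∈ List.range 1901, coeff_round ((n : Int) - 950) = coeff_round_alt ((n : Int) - 950) := by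
  decide

-- ===== VERDICT (by name: the statement is the Claim_ definition above) =====
theorem coeff_round_spec : Claim_equal_coeff_round := by
  intro x _
  unfold Spec_coeff_round
  by_cases hb : 951 ≤ x ∨ x ≤ -951
  · rcases hb with h | h
    · rw [A_big_pos x h, B_big x (Or.inl h), if_pos (by omega)]
    · rw [A_big_neg x h, B_big x (Or.inr h), if_neg (by omega)]
  · have hx : x = ((x + 950).toNat : Int) - 950 := by omega
    rw [hx]
    exact mid_all _ (List.mem_range.mpr (by omega))
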